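-- pv_equiv track=rewrite | github.com/Eilen6316/LinuxAgent | src/linuxagent/plans/file_patch.py | _find_hunk_old_sequence
-- ===== SOURCE A (Python) =====
-- def _find_hunk_old_sequence(
--     old_lines: list[str],
--     old_sequence: tuple[str, ...],
--     start: int,
--     preferred: int,
-- ) -> int | None:
--     candidates = [
--         index
--         for index in range(start, len(old_lines) - len(old_sequence) + 1)
--         if _old_sequence_matches(old_lines, index, old_sequence)
--     ]
--     if not candidates:
--         return None
--     return min(candidates, key=lambda index: abs(index - preferred))
--
-- def _old_sequence_matches(old_lines: list[str], start: int, old_sequence: tuple[str, ...]) -> bool: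
--     if start < 0 or start + len(old_sequence) > len(old_lines):
--         return False
--     return tuple(old_lines[start : start + len(old_sequence)]) == old_sequence
-- ===== SOURCE B (Python) =====
-- def _find_hunk_old_sequence(old_lines, old_sequence, start, preferred):
--     # Outward scan from the preferred index (clamped into the valid window):
--     # visits positions in increasing distance from it, lower index first on ties,
--     # and returns at the FIRST match instead of collecting all matches.
--     m = len(old_sequence)
--     seq = list(old_sequence)
--     lo = max(start, 0)
--     hi = len(old_lines) - m
--     if lo > hi:
--         return None
--     q = min(max(preferred, lo), hi)
--     for d in range(0, max(q - lo, hi - q) + 1):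
--         i = q - d
--         if i >= lo and old_lines[i:i + m] == seq:
--             return i
--         j = q + d
--         if d > 0 and j <= hi and old_lines[j:j + m] == seq:
--             return j
--     return None
-- ===== Notes on version B (the rewrite author's own statement) =====
-- stated objective: alternative
-- what changed: B replaces A's full left-to-right scan that collects every matching index and then takes min-by-distance with a single outward scan from the clamped preferred index that returns at the first match found (nearest position, lower index on ties).
import Mathlib
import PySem

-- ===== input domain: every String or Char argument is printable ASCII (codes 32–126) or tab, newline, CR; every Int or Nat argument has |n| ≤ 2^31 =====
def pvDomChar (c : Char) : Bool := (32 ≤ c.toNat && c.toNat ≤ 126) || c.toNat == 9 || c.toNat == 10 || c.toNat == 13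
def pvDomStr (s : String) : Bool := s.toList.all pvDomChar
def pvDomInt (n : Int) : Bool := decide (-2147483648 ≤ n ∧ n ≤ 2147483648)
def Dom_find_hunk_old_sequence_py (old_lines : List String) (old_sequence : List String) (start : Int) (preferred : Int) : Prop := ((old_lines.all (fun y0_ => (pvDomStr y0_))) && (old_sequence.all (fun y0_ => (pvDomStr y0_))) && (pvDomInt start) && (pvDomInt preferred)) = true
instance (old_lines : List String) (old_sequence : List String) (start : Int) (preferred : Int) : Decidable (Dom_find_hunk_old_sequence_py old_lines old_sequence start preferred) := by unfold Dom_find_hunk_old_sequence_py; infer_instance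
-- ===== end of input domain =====

-- B replaces A's collect-all-matches-then-min-by-distance scan with a single outward scan from the
-- clamped preferred index that returns at the first match (same result; alternative algorithm, early exit).


-- ===== PORT A =====
-- Python helper _old_sequence_matches
def old_sequence_matches_py (old_lines : List String) (start : Int) (old_sequence : List String) : Bool :=
  if start < 0 ∨ start + (old_sequence.length : Int) > (old_lines.length : Int) then false
  else PySem.List.slice old_lines (some start) (some (start + (old_sequence.length : Int))) == old_sequence

def find_hunk_old_sequence_py (old_lines : List String) (old_sequence : List String) (start : Int) (preferred : Int) : Option Int :=
  let candidates :=
    (PySem.List.pyRange start ((old_lines.length : Int) - (old_sequence.length : Int) + 1) 1).filter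
      (fun index => old_sequence_matches_py old_lines index old_sequence)
  if candidates.isEmpty then none
  else PySem.List.min? candidates (fun index => |index - preferred|)

-- ===== PORT B =====
-- B's inline slice comparison old_lines[i:i+m] == seq
def matchesB (old_lines : List String) (old_sequence : List String) (i : Int) : Bool :=
  PySem.List.slice old_lines (some i) (some (i + (old_sequence.length : Int))) == old_sequence

-- B's for-loop over d = 0,1,2,… (cnt = remaining iterations)
def scanB (old_lines : List String) (old_sequence : List String) (lo hi q : Int) (d : Nat) (cnt : Nat) : Option Int :=
  match cnt with
  | 0 => none
  | cnt' + 1 =>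
    if lo ≤ q - (d : Int) ∧ matchesB old_lines old_sequence (q - (d : Int)) = true then
      some (q - (d : Int))
    else if 0 < d ∧ q + (d : Int) ≤ hi ∧ matchesB old_lines old_sequence (q + (d : Int)) = true then
      some (q + (d : Int))
    else scanB old_lines old_sequence lo hi q (d + 1) cnt'

def find_hunk_old_sequence_py_alt (old_lines : List String) (old_sequence : List String) (start : Int) (preferred : Int) : Option Int :=
  let lo := max start 0
  let hi := (old_lines.length : Int) - (old_sequence.length : Int)
  if lo > hi then none
  else
    let q := min (max preferred lo) hi
    scanB old_lines old_sequence lo hi q 0 (max (q - lo) (hi - q) + 1).toNat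

-- ===== PRECONDITION & SPEC =====
def Spec_find_hunk_old_sequence_py (old_lines : List String) (old_sequence : List String) (start : Int) (preferred : Int) (out : Option Int) : Prop := out = find_hunk_old_sequence_py_alt old_lines old_sequence start preferred
instance (old_lines : List String) (old_sequence : List String) (start : Int) (preferred : Int) (out : Option Int) : Decidable (Spec_find_hunk_old_sequence_py old_lines old_sequence start preferred out) := by unfold Spec_find_hunk_old_sequence_py; infer_instance

-- ===== CLAIM (what is proved, stated in full; the proofs are below) =====
def Claim_equal_find_hunk_old_sequence_py : Prop := ∀ (old_lines : List String) (old_sequence : List String) (start : Int) (preferred : Int), Dom_find_hunk_old_sequence_py old_lines old_sequence start preferred → Spec_find_hunk_old_sequence_py old_lines old_sequence start preferred (find_hunk_old_sequence_py old_lines old_sequence start preferred)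

-- ===== LEMMAS AND PROOFS =====

-- "x is the answer": x matches inside the window and lex-minimises (|·-preferred|, ·) over matches
def IsBest (ol os : List String) (lo hi p x : Int) : Prop :=
  lo ≤ x ∧ x ≤ hi ∧ old_sequence_matches_py ol x os = true ∧
  ∀ y, lo ≤ y → y ≤ hi → old_sequence_matches_py ol y os = true →
    (|x - p| < |y - p| ∨ (|x - p| = |y - p| ∧ x ≤ y))

theorem isBest_unique {ol os : List String} {lo hi p x y : Int}
    (hx : IsBest ol os lo hi p x) (hy : IsBest ol os lo hi p y) : x = y := by
  obtain ⟨hx1, hx2, hx3, hx4⟩ := hx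
  obtain ⟨hy1, hy2, hy3, hy4⟩ := hy
  have h1 := hx4 y hy1 hy2 hy3
  have h2 := hy4 x hx1 hx2 hx3
  simp only [Int.abs_eq_natAbs] at h1 h2
  omega

theorem matches_bounds {ol os : List String} {y : Int}
    (h : old_sequence_matches_py ol y os = true) :
    0 ≤ y ∧ y + (os.length : Int) ≤ (ol.length : Int) := by
  unfold old_sequence_matches_py at h
  split at h
  · exact absurd h (by simp)
  · rename_i hg; push_neg at hg; omega

theorem matchesB_bridge (ol os : List String) (i : Int) (h0 : 0 ≤ i)
    (h1 : i + (os.length : Int) ≤ (ol.length : Int)) :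
    matchesB ol os i = old_sequence_matches_py ol i os := by
  unfold matchesB old_sequence_matches_py
  rw [if_neg (by omega)]

theorem mem_candidates {ol os : List String} {start y : Int} :
    y ∈ (PySem.List.pyRange start ((ol.length : Int) - (os.length : Int) + 1) 1).filter
        (fun index => old_sequence_matches_py ol index os) ↔
    (start ≤ y ∧ y ≤ (ol.length : Int) - (os.length : Int) ∧
      old_sequence_matches_py ol y os = true) := by
  rw [List.mem_filter, PySem.List.mem_pyRange_one]
  constructor
  · rintro ⟨⟨h1, h2⟩, h3⟩; exact ⟨h1, by omega, h3⟩
  · rintro ⟨h1, h2, h3⟩; exact ⟨⟨h1, by omega⟩, h3⟩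

-- Python's min(·, key=·) fold, specialised to a non-empty list: a plain running fold on Int
theorem min?_cons (key : Int → Int) :
    ∀ (xs : List Int) (a : Int),
    PySem.List.min? (a :: xs) key =
      some (xs.foldl (fun m x => if key x < key m then x else m) a) := by
  intro xs
  induction xs with
  | nil => intro a; simp [PySem.List.min?]
  | cons x rest ih =>
    intro a
    have h1 := ih (if key x < key a then x else a)
    unfold PySem.List.min? at h1 ⊢
    simp only [List.foldl_cons] at h1 ⊢
    by_cases hxa : key x < key a
    · simpa [hxa] using h1
    · simpa [hxa] using h1

-- the running-min fold computes the lexicographic minimum on a strictly increasing list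
theorem foldl_lexmin (key : Int → Int) :
    ∀ (xs : List Int) (a m : Int), (∀ y ∈ xs, a < y) → xs.Pairwise (· < ·) →
    xs.foldl (fun m x => if key x < key m then x else m) a = m →
    (m = a ∨ m ∈ xs) ∧ (key m < key a ∨ (key m = key a ∧ m ≤ a)) ∧
    (∀ y ∈ xs, key m < key y ∨ (key m = key y ∧ m ≤ y)) := by
  intro xs
  induction xs with
  | nil =>
    intro a m _ _ h
    simp only [List.foldl_nil] at h
    subst h
    exact ⟨Or.inl rfl, Or.inr ⟨rfl, le_refl _⟩, by simp⟩
  | cons x rest ih =>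
    intro a m ha hp h
    simp only [List.foldl_cons] at h
    have hax : a < x := ha x (by simp)
    have hrest_gt : ∀ y ∈ rest, (if key x < key a then x else a) < y := by
      intro y hy
      have h1 : a < y := ha y (by simp [hy])
      have h2 : x < y := (List.pairwise_cons.mp hp).1 y hy
      split <;> assumption
    have hp' : rest.Pairwise (· < ·) := (List.pairwise_cons.mp hp).2
    obtain ⟨hmem, hba, hr⟩ := ih (if key x < key a then x else a) m hrest_gt hp' h
    by_cases hxa : key x < key a
    · simp only [if_pos hxa] at hmem hba
      refine ⟨?_, ?_, ?_⟩
      · rcases hmem with h1 | h1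
        · exact Or.inr (by simp [h1])
        · exact Or.inr (by simp [h1])
      · rcases hba with h1 | ⟨h1, h2⟩
        · exact Or.inl (by linarith)
        · exact Or.inl (by rw [h1]; exact hxa)
      · intro y hy
        rcases List.mem_cons.mp hy with rfl | hy'
        · exact hba
        · exact hr y hy'
    · simp only [if_neg hxa] at hmem hba
      push_neg at hxa
      refine ⟨?_, hba, ?_⟩
      · rcases hmem with h1 | h1
        · exact Or.inl h1
        · exact Or.inr (by simp [h1])
      · intro y hy
        rcases List.mem_cons.mp hy with rfl | hy'
        · rcases hba with h1 | ⟨h1, h2⟩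
          · exact Or.inl (by linarith)
          · rcases lt_or_eq_of_le hxa with h3 | h3
            · exact Or.inl (by linarith)
            · exact Or.inr ⟨by rw [h1, h3], by linarith [hax]⟩
        · exact hr y hy'

theorem min?_lex (key : Int → Int) (xs : List Int) (hp : xs.Pairwise (· < ·)) (m : Int)
    (h : PySem.List.min? xs key = some m) :
    m ∈ xs ∧ ∀ y ∈ xs, key m < key y ∨ (key m = key y ∧ m ≤ y) := by
  cases xs with
  | nil => simp [PySem.List.min?] at h
  | cons c rest =>
    rw [min?_cons] at h
    rw [Option.some.injEq] at h
    obtain ⟨hmem, hbc, hr⟩ := foldl_lexmin key rest c m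
      (fun y hy => (List.pairwise_cons.mp hp).1 y hy) (List.pairwise_cons.mp hp).2 h
    refine ⟨?_, ?_⟩
    · rcases hmem with h1 | h1
      · simp [h1]
      · simp [h1]
    · intro y hy
      rcases List.mem_cons.mp hy with rfl | hy'
      · exact hbc
      · exact hr y hy'

-- A returns the IsBest element (or none exactly when no match exists in the window)
theorem A_char (ol os : List String) (start p : Int) :
    (find_hunk_old_sequence_py ol os start p = none →
      ∀ y, max start 0 ≤ y → y ≤ (ol.length : Int) - (os.length : Int) →
        old_sequence_matches_py ol y os = true → False) ∧
    (∀ m, find_hunk_old_sequence_py ol os start p = some m →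
      IsBest ol os (max start 0) ((ol.length : Int) - (os.length : Int)) p m) := by
  set C := (PySem.List.pyRange start ((ol.length : Int) - (os.length : Int) + 1) 1).filter
      (fun index => old_sequence_matches_py ol index os) with hC
  have hEq : find_hunk_old_sequence_py ol os start p =
      (if C.isEmpty then none else PySem.List.min? C (fun index => |index - p|)) := rfl
  rw [hEq]
  have hmemC : ∀ y, y ∈ C ↔ (start ≤ y ∧ y ≤ (ol.length : Int) - (os.length : Int) ∧
      old_sequence_matches_py ol y os = true) := fun y => mem_candidates
  have hpw : C.Pairwise (· < ·) := List.Pairwise.filter _ (PySem.List.pairwise_lt_pyRange_one _ _)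
  constructor
  · intro hnone y h1 h2 h3
    have hyC : y ∈ C := (hmemC y).mpr ⟨by omega, h2, h3⟩
    split at hnone
    · rename_i hemp
      rw [List.isEmpty_iff] at hemp
      rw [hemp] at hyC; simp at hyC
    · rw [PySem.List.min?_eq_none_iff] at hnone
      rw [hnone] at hyC; simp at hyC
  · intro m hsome
    split at hsome
    · simp at hsome
    · obtain ⟨hmC, hlex⟩ := min?_lex _ C hpw m hsome
      obtain ⟨hm1, hm2, hm3⟩ := (hmemC m).mp hmC
      have hb := matches_bounds hm3
      refine ⟨by omega, hm2, hm3, ?_⟩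
      intro y hy1 hy2 hy3
      exact hlex y ((hmemC y).mpr ⟨by omega, hy2, hy3⟩)

-- B's outward scan returns the IsBest element (or none exactly when no match exists)
theorem scanB_char (ol os : List String) (lo hi q p : Int)
    (hlo : 0 ≤ lo) (hq1 : lo ≤ q) (hq2 : q ≤ hi)
    (hhi : hi = (ol.length : Int) - (os.length : Int))
    (hp : q = min (max p lo) hi) :
    ∀ (cnt d : Nat), (d : Int) + (cnt : Int) = max (q - lo) (hi - q) + 1 →
    (∀ y, lo ≤ y → y ≤ hi → old_sequence_matches_py ol y os = true → (d : Int) ≤ |y - q|) →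
    ((∀ m, scanB ol os lo hi q d cnt = some m → IsBest ol os lo hi p m) ∧
     (scanB ol os lo hi q d cnt = none →
       ∀ y, lo ≤ y → y ≤ hi → old_sequence_matches_py ol y os = true → False)) := by
  intro cnt
  induction cnt with
  | zero =>
    intro d harith hinv
    constructor
    · intro m h; simp [scanB] at h
    · intro _ y h1 h2 h3
      have := hinv y h1 h2 h3
      simp only [Int.abs_eq_natAbs] at this
      omega
  | succ cnt' ih =>
    intro d harith hinv
    have hbridge : ∀ i : Int, lo ≤ i → i ≤ hi →
        (matchesB ol os i = old_sequence_matches_py ol i os) := by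
      intro i h1 h2
      exact matchesB_bridge ol os i (by omega) (by omega)
    constructor
    · intro m h
      unfold scanB at h
      split at h
      · rename_i hcond
        obtain ⟨hc1, hc2⟩ := hcond
        rw [Option.some.injEq] at h
        subst h
        have him : old_sequence_matches_py ol (q - (d : Int)) os = true := by
          rw [← hbridge _ hc1 (by omega)]; exact hc2
        refine ⟨hc1, by omega, him, ?_⟩
        intro y hy1 hy2 hy3
        have hdy := hinv y hy1 hy2 hy3
        simp only [Int.abs_eq_natAbs] at hdy ⊢
        omega
      · split at h
        · rename_i hcond1 hcond2
          obtain ⟨hd0, hjhi, hc2⟩ := hcond2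
          rw [Option.some.injEq] at h
          subst h
          have hjm : old_sequence_matches_py ol (q + (d : Int)) os = true := by
            rw [← hbridge _ (by omega) hjhi]; exact hc2
          refine ⟨by omega, hjhi, hjm, ?_⟩
          intro y hy1 hy2 hy3
          have hdy := hinv y hy1 hy2 hy3
          by_cases hyi : y = q - (d : Int)
          · exfalso
            apply hcond1
            refine ⟨by omega, ?_⟩
            rw [hbridge _ (by omega) (by omega), ← hyi]; exact hy3
          · simp only [Int.abs_eq_natAbs] at hdy ⊢
            omega
        · rename_i hcond1 hcond2
          have hinv' : ∀ y, lo ≤ y → y ≤ hi → old_sequence_matches_py ol y os = true →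
              ((d + 1 : Nat) : Int) ≤ |y - q| := by
            intro y hy1 hy2 hy3
            have hdy := hinv y hy1 hy2 hy3
            by_cases hyi : y = q - (d : Int)
            · exfalso
              apply hcond1
              refine ⟨by omega, ?_⟩
              rw [hbridge _ (by omega) (by omega), ← hyi]; exact hy3
            · by_cases hyj : y = q + (d : Int)
              · exfalso
                by_cases hd0 : 0 < d
                · apply hcond2
                  refine ⟨hd0, by omega, ?_⟩
                  rw [hbridge _ (by omega) (by omega), ← hyj]; exact hy3
                · apply hcond1
                  have hd : d = 0 := by omega
                  refine ⟨by omega, ?_⟩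
                  rw [hbridge _ (by omega) (by omega)]
                  have : q - (d : Int) = y := by omega
                  rw [this]; exact hy3
              · simp only [Int.abs_eq_natAbs] at hdy ⊢
                omega
          exact (ih (d + 1) (by push_cast; push_cast at harith; omega) hinv').1 m h
    · intro h
      unfold scanB at h
      split at h
      · simp at h
      · split at h
        · simp at h
        · rename_i hcond1 hcond2
          have hinv' : ∀ y, lo ≤ y → y ≤ hi → old_sequence_matches_py ol y os = true →
              ((d + 1 : Nat) : Int) ≤ |y - q| := by
            intro y hy1 hy2 hy3
            have hdy := hinv y hy1 hy2 hy3
            by_cases hyi : y = q - (d : Int)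
            · exfalso
              apply hcond1
              refine ⟨by omega, ?_⟩
              rw [hbridge _ (by omega) (by omega), ← hyi]; exact hy3
            · by_cases hyj : y = q + (d : Int)
              · exfalso
                by_cases hd0 : 0 < d
                · apply hcond2
                  refine ⟨hd0, by omega, ?_⟩
                  rw [hbridge _ (by omega) (by omega), ← hyj]; exact hy3
                · apply hcond1
                  have hd : d = 0 := by omega
                  refine ⟨by omega, ?_⟩
                  rw [hbridge _ (by omega) (by omega)]
                  have : q - (d : Int) = y := by omega
                  rw [this]; exact hy3
              · simp only [Int.abs_eq_natAbs] at hdy ⊢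
                omega
          exact (ih (d + 1) (by push_cast; push_cast at harith; omega) hinv').2 h

theorem B_char (ol os : List String) (start p : Int) :
    (find_hunk_old_sequence_py_alt ol os start p = none →
      ∀ y, max start 0 ≤ y → y ≤ (ol.length : Int) - (os.length : Int) →
        old_sequence_matches_py ol y os = true → False) ∧
    (∀ m, find_hunk_old_sequence_py_alt ol os start p = some m →
      IsBest ol os (max start 0) ((ol.length : Int) - (os.length : Int)) p m) := by
  set lo := max start 0 with hlo
  set hi := (ol.length : Int) - (os.length : Int) with hhi
  have hEq : find_hunk_old_sequence_py_alt ol os start p =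
      (if lo > hi then none
       else scanB ol os lo hi (min (max p lo) hi)
         0 (max ((min (max p lo) hi) - lo) (hi - (min (max p lo) hi)) + 1).toNat) := rfl
  rw [hEq]
  by_cases hcase : lo > hi
  · rw [if_pos hcase]
    constructor
    · intro _ y h1 h2 h3
      have hb := matches_bounds h3
      omega
    · intro m h; simp at h
  · rw [if_neg hcase]
    push_neg at hcase
    set q := min (max p lo) hi with hq
    have hq1 : lo ≤ q := by omega
    have hq2 : q ≤ hi := by omega
    have hD : (0 : Int) ≤ max (q - lo) (hi - q) := by omega
    have hcast : (((max (q - lo) (hi - q) + 1).toNat : Int)) = max (q - lo) (hi - q) + 1 := by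
      omega
    have := scanB_char ol os lo hi q p (by omega) hq1 hq2 hhi hq
      (max (q - lo) (hi - q) + 1).toNat 0
      (by push_cast; omega)
      (by intro y _ _ _; positivity)
    exact ⟨this.2, this.1⟩

-- ===== VERDICT (by name: the statement is the Claim_ definition above) =====
theorem find_hunk_old_sequence_py_spec : Claim_equal_find_hunk_old_sequence_py := by
  intro ol os start p _
  unfold Spec_find_hunk_old_sequence_py
  obtain ⟨hAn, hAs⟩ := A_char ol os start p
  obtain ⟨hBn, hBs⟩ := B_char ol os start p
  cases hA : find_hunk_old_sequence_py ol os start p with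
  | none =>
    cases hB : find_hunk_old_sequence_py_alt ol os start p with
    | none => rfl
    | some m =>
      obtain ⟨h1, h2, h3, _⟩ := hBs m hB
      exact absurd (hAn hA m h1 h2 h3) (by simp)
  | some m =>
    cases hB : find_hunk_old_sequence_py_alt ol os start p with
    | none =>
      obtain ⟨h1, h2, h3, _⟩ := hAs m hA
      exact absurd (hBn hB m h1 h2 h3) (by simp)
    | some m' =>
      rw [isBest_unique (hAs m hA) (hBs m' hB)]
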